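-- pv_equiv track=rewrite | github.com/genesysd/clean_mappings | col_clean.py | clean_cols
-- ===== SOURCE A (Python) =====
-- def clean_cols(listOfDict):
--     schema_new = []
--     for i in listOfDict:
--         if 'cln_col_name' in i:
--             schema_new.append(i['cln_col_name'])
--         else:
--             rawColC = i['raw_col_name'].lower().endswith('_c')
--             if i['data_type'].lower() == 'boolean':
--                 if rawColC == True:
--                     s = i['raw_col_name'][:-2] + '_flag'
--                     schema_new.append(s)
--                 else:
--                     schema_new.append(i['raw_col_name'] + '_flag')
--             elif i['data_type'].lower() == 'timestamp':
--                 if rawColC == True: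
--                     s = i['raw_col_name'][:-2] + '_utc_ts'
--                     schema_new.append(s)
--                 else:
--                     schema_new.append(i['raw_col_name'] + '_utc_ts')
--             else:
--                 if rawColC == True:
--                     schema_new.append(i['raw_col_name'][:-2])
--                 else:
--                     schema_new.append(i['raw_col_name'])
--     return schema_new
-- ===== SOURCE B (Python) =====
-- _SUFFIX = {'boolean': '_flag', 'timestamp': '_utc_ts'}
--
--
-- def _base(i):
--     if 'cln_col_name' in i:
--         return i['cln_col_name']
--     raw = i['raw_col_name']
--     return raw[:-2] if raw.lower().endswith('_c') else raw
--
--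
-- def _suffix(i):
--     if 'cln_col_name' in i:
--         return ''
--     return _SUFFIX.get(i['data_type'].lower(), '')
--
--
-- def clean_cols(listOfDict):
--     bases = [_base(i) for i in listOfDict]
--     suffixes = [_suffix(i) for i in listOfDict]
--     return [b + s for b, s in zip(bases, suffixes)]
-- ===== Notes on version B (the rewrite author's own statement) =====
-- stated objective: alternative
-- what changed: Replaces A's single accumulator loop with nested duplicated branches by three staged passes: one pass computing the stripped base names, a second pass computing suffixes from a constant data_type-to-suffix table, and a final zip concatenating them.
import Mathlib
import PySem

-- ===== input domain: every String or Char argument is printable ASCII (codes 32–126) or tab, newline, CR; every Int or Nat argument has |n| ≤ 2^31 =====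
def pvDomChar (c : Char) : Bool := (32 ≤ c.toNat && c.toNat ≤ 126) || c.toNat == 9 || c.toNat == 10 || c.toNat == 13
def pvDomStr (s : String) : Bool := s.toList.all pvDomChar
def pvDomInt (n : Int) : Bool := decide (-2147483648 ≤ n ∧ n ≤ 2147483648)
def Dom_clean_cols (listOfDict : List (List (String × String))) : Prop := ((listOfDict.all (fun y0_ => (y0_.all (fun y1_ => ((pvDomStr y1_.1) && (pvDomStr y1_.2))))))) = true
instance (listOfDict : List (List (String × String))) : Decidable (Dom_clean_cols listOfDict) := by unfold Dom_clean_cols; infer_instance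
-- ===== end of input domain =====

-- B replaces A's single accumulator loop with duplicated nested branches by three
-- staged passes: a bases pass, a suffix-table pass, and a zip concatenating them.

-- exact port of Python string concatenation '+' on code points
def strAdd (a b : String) : String := String.ofList (a.toList ++ b.toList)

-- ===== PORT A =====
def clean_cols (listOfDict : List (List (String × String))) : List String :=
  listOfDict.foldl (fun schema_new i =>
    let d := PySem.Dict.mk i
    if d.contains "cln_col_name" then
      schema_new ++ [(d.get? "cln_col_name").getD ""]
    else
      let raw := (d.get? "raw_col_name").getD ""
      let rawColC := PySem.Str.endswith (PySem.Str.lower raw) "_c"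
      if PySem.Str.lower ((d.get? "data_type").getD "") = "boolean" then
        if rawColC then
          schema_new ++ [strAdd (PySem.Str.slice raw none (some (-2))) "_flag"]
        else
          schema_new ++ [strAdd raw "_flag"]
      else if PySem.Str.lower ((d.get? "data_type").getD "") = "timestamp" then
        if rawColC then
          schema_new ++ [strAdd (PySem.Str.slice raw none (some (-2))) "_utc_ts"]
        else
          schema_new ++ [strAdd raw "_utc_ts"]
      else
        if rawColC then
          schema_new ++ [PySem.Str.slice raw none (some (-2))]
        else
          schema_new ++ [raw]) []

-- ===== PORT B =====
def suffixMap : PySem.Dict String String :=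
  PySem.Dict.mk [("boolean", "_flag"), ("timestamp", "_utc_ts")]

def baseOf (i : List (String × String)) : String :=
  let d := PySem.Dict.mk i
  if d.contains "cln_col_name" then
    (d.get? "cln_col_name").getD ""
  else
    let raw := (d.get? "raw_col_name").getD ""
    if PySem.Str.endswith (PySem.Str.lower raw) "_c" then
      PySem.Str.slice raw none (some (-2))
    else raw

def suffixOf (i : List (String × String)) : String :=
  let d := PySem.Dict.mk i
  if d.contains "cln_col_name" then ""
  else suffixMap.getD (PySem.Str.lower ((d.get? "data_type").getD "")) ""

def clean_cols_alt (listOfDict : List (List (String × String))) : List String :=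
  let bases := listOfDict.map baseOf
  let suffixes := listOfDict.map suffixOf
  List.zipWith strAdd bases suffixes

-- ===== PRECONDITION & SPEC =====
-- Pre_ excludes exactly the dicts on which Python A raises KeyError:
-- those with no 'cln_col_name' and missing 'raw_col_name' or 'data_type'.
def Pre_clean_cols (listOfDict : List (List (String × String))) : Prop :=
  (listOfDict.all (fun i =>
    (PySem.Dict.mk i).contains "cln_col_name" ||
    ((PySem.Dict.mk i).contains "raw_col_name" && (PySem.Dict.mk i).contains "data_type"))) = true
instance (listOfDict : List (List (String × String))) : Decidable (Pre_clean_cols listOfDict) := by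
  unfold Pre_clean_cols; infer_instance

def pvWitness_clean_cols : (List (List (String × String))) :=
  [[("raw_col_name", "A_C"), ("data_type", "Boolean")], [("cln_col_name", "ok")]]

def Spec_clean_cols (listOfDict : List (List (String × String))) (out : List String) : Prop := out = clean_cols_alt listOfDict
instance (listOfDict : List (List (String × String))) (out : List String) : Decidable (Spec_clean_cols listOfDict out) := by unfold Spec_clean_cols; infer_instance

-- ===== CLAIM (what is proved, stated in full; the proofs are below) =====
def Claim_equal_clean_cols : Prop := ∀ (listOfDict : List (List (String × String))), Dom_clean_cols listOfDict → Pre_clean_cols listOfDict → Spec_clean_cols listOfDict (clean_cols listOfDict)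

-- ===== LEMMAS AND PROOFS =====

theorem strAdd_empty (a : String) : strAdd a "" = a := by
  simp [strAdd]

theorem suffix_lookup (k : String) (hb : ¬ k = "boolean") (ht : ¬ k = "timestamp") :
    suffixMap.getD k "" = "" := by
  have h1 : ("boolean" == k) = false := by simpa using fun h => hb h.symm
  have h2 : ("timestamp" == k) = false := by simpa using fun h => ht h.symm
  simp [suffixMap, PySem.Dict.getD, PySem.Dict.get?_mk_cons, h1, h2, PySem.Dict.get?]

theorem step_eq :
    (fun (schema_new : List String) j =>
    let d := PySem.Dict.mk j
    if d.contains "cln_col_name" then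
      schema_new ++ [(d.get? "cln_col_name").getD ""]
    else
      let raw := (d.get? "raw_col_name").getD ""
      let rawColC := PySem.Str.endswith (PySem.Str.lower raw) "_c"
      if PySem.Str.lower ((d.get? "data_type").getD "") = "boolean" then
        if rawColC then
          schema_new ++ [strAdd (PySem.Str.slice raw none (some (-2))) "_flag"]
        else
          schema_new ++ [strAdd raw "_flag"]
      else if PySem.Str.lower ((d.get? "data_type").getD "") = "timestamp" then
        if rawColC then
          schema_new ++ [strAdd (PySem.Str.slice raw none (some (-2))) "_utc_ts"]
        else
          schema_new ++ [strAdd raw "_utc_ts"]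
      else
        if rawColC then
          schema_new ++ [PySem.Str.slice raw none (some (-2))]
        else
          schema_new ++ [raw]) = (fun schema_new j => schema_new ++ [strAdd (baseOf j) (suffixOf j)]) := by
  funext schema_new j
  simp only [baseOf, suffixOf]
  by_cases hc : (PySem.Dict.mk j).contains "cln_col_name"
  · simp [hc, strAdd_empty]
  · by_cases hb : PySem.Str.lower (((PySem.Dict.mk j).get? "data_type").getD "") = "boolean"
    · simp [hc, hb, suffixMap, PySem.Dict.getD, PySem.Dict.get?_mk_cons]
      split_ifs <;> rfl
    · by_cases ht : PySem.Str.lower (((PySem.Dict.mk j).get? "data_type").getD "") = "timestamp"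
      · simp [hc, ht, suffixMap, PySem.Dict.getD, PySem.Dict.get?_mk_cons]
        split_ifs <;> rfl
      · have hs : suffixMap.getD (PySem.Str.lower (((PySem.Dict.mk j).get? "data_type").getD "")) "" = "" :=
          suffix_lookup _ hb ht
        simp only [hc, hb, ht, if_false, Bool.false_eq_true, hs, strAdd_empty]
        split_ifs <;> rfl

theorem zipWith_map_self {α β : Type} (f : β → β → α) (g h : List (String × String) → β)
    (l : List (List (String × String))) :
    List.zipWith f (l.map g) (l.map h) = l.map (fun i => f (g i) (h i)) := by
  induction l with
  | nil => rfl
  | cons x xs ih => simp [ih]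

-- ===== VERDICT (by name: the statement is the Claim_ definition above) =====
theorem clean_cols_spec : Claim_equal_clean_cols := by
  intro l _ _
  unfold Spec_clean_cols clean_cols clean_cols_alt
  rw [step_eq, zipWith_map_self]
  simpa using PySem.List.foldl_append_singleton_eq_map (fun i => strAdd (baseOf i) (suffixOf i)) l []
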